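-- pv_equiv track=rewrite | github.com/Abadhor/master-thesis-repo | tensorflow/baseline.py | getMWTs
-- ===== SOURCE A (Python) =====
-- def getMWTs(sentence):
--   # get MWTs in a sentence
--   MWTs = []
--   B_idx = None
--   for idx, t in enumerate(sentence):
--     if t == 'B':
--       B_idx = idx
--     elif t == 'L':
--       if B_idx != None:
--         MWTs.append((B_idx,idx))
--       B_idx = None
--   return MWTs
-- ===== SOURCE B (Python) =====
-- def getMWTs(sentence):
--   # get MWTs in a sentence: collect 'L' positions, then match each one's
--   # opener by scanning backward to the first preceding 'B' (pair) or 'L' (none)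
--   l_positions = [i for i, t in enumerate(sentence) if t == 'L']
--   MWTs = []
--   for i in l_positions:
--     j = i - 1
--     while j >= 0:
--       t = sentence[j]
--       if t == 'B':
--         MWTs.append((j, i))
--         break
--       if t == 'L':
--         break
--       j -= 1
--   return MWTs
-- ===== Notes on version B (the rewrite author's own statement) =====
-- stated objective: alternative
-- what changed: Replaces A's single forward pass with a running B-register by a two-phase approach: first collect all 'L' indices, then for each one scan backward to the first preceding 'B' (emit the pair) or 'L' (emit nothing).
import Mathlib
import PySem

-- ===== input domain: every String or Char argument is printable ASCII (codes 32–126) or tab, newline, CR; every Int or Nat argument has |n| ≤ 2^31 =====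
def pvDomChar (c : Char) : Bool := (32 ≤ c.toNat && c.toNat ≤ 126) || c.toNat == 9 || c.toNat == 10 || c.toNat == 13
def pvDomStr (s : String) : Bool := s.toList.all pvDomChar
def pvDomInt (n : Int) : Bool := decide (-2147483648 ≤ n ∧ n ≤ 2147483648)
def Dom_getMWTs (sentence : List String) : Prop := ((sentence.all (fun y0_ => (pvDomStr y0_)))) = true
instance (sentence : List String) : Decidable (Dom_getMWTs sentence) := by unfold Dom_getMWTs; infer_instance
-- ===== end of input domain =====

-- B replaces A's forward state machine by collecting 'L' indices and matching each
-- by a backward scan to the first preceding 'B' or 'L' (objective: alternative algorithm).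

-- ===== PORT A =====
-- loop body of A's single forward pass: state = (MWTs, B_idx)
def stepA (st : List (Int × Int) × Option Int) (p : Int × String) :
    List (Int × Int) × Option Int :=
  if p.2 == "B" then (st.1, some p.1)
  else if p.2 == "L" then
    ((match st.2 with
      | some b => st.1 ++ [(b, p.1)]
      | none => st.1), none)
  else st

def getMWTs (sentence : List String) : List (Int × Int) :=
  ((PySem.List.enumerate sentence 0).foldl stepA ([], none)).1

-- ===== PORT B =====
-- Source B's while-loop: scan positions j-1, j-2, …, 0 for the first 'B' or 'L'.
-- sentence[j] in Source B is always in range (0 ≤ j < i < len), so getD is exact.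
def scanBack (s : List String) : Nat → Option Nat
  | 0 => none
  | j + 1 =>
    if s.getD j "" == "B" then some j
    else if s.getD j "" == "L" then none
    else scanBack s j

-- Source B's first pass: the indices carrying an 'L' tag
def lpositions (s : List String) : List Int :=
  (PySem.List.enumerate s 0).filterMap (fun p => if p.2 == "L" then some p.1 else none)

-- Source B's second pass body
def stepB (s : List String) (acc : List (Int × Int)) (i : Int) : List (Int × Int) :=
  match scanBack s i.toNat with
  | some j => acc ++ [((j : Int), i)]
  | none => acc

def getMWTs_alt (sentence : List String) : List (Int × Int) :=
  (lpositions sentence).foldl (stepB sentence) []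

-- ===== PRECONDITION & SPEC =====
def Spec_getMWTs (sentence : List String) (out : List (Int × Int)) : Prop := out = getMWTs_alt sentence
instance (sentence : List String) (out : List (Int × Int)) : Decidable (Spec_getMWTs sentence out) := by unfold Spec_getMWTs; infer_instance

-- ===== CLAIM (what is proved, stated in full; the proofs are below) =====
def Claim_equal_getMWTs : Prop := ∀ (sentence : List String), Dom_getMWTs sentence → Spec_getMWTs sentence (getMWTs sentence)

-- ===== LEMMAS AND PROOFS =====

-- scanBack only inspects positions < j, so it ignores a suffix
lemma scanBack_prefix (t u : List String) (j : Nat) (h : j ≤ t.length) :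
    scanBack (t ++ u) j = scanBack t j := by
  induction j with
  | zero => rfl
  | succ j ih =>
    have hj : j < t.length := h
    rw [scanBack, scanBack, List.getD_append _ _ _ _ hj, ih (Nat.le_of_lt hj)]

lemma mem_lpositions {t : List String} {i : Int} (h : i ∈ lpositions t) :
    0 ≤ i ∧ i.toNat ≤ t.length := by
  unfold lpositions at h
  rcases List.mem_filterMap.mp h with ⟨p, hp, hpi⟩
  rcases (PySem.List.mem_enumerate_iff _ _ _).mp hp with ⟨k, hk, rfl⟩
  simp only [zero_add] at hpi
  by_cases hL : (t[k] == "L") = true <;> simp [hL] at hpi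
  subst hpi
  refine ⟨by positivity, by simpa using Nat.le_of_lt hk⟩

lemma lpositions_append (t : List String) (x : String) :
    lpositions (t ++ [x]) =
      lpositions t ++ (if x == "L" then [((t.length : Int))] else []) := by
  unfold lpositions
  rw [PySem.List.enumerate_append, List.filterMap_append]
  by_cases hL : x = "L" <;>
    simp [PySem.List.enumerate_cons, PySem.List.enumerate_nil, hL]

-- the heart: A's fold state after the whole list = (B's output, the backward-scan register)
lemma foldA_eq (s : List String) :
    (PySem.List.enumerate s 0).foldl stepA ([], none)
      = (getMWTs_alt s, (scanBack s s.length).map (fun n => (n : Int))) := by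
  induction s using List.reverseRecOn with
  | nil => simp [getMWTs_alt, lpositions, scanBack, PySem.List.enumerate_nil]
  | append_singleton t x ih =>
    have henum : PySem.List.enumerate (t ++ [x]) 0
        = PySem.List.enumerate t 0 ++ [(((t.length : Int)), x)] := by
      rw [PySem.List.enumerate_append]
      simp [PySem.List.enumerate_cons, PySem.List.enumerate_nil]
    have haltcongr : ∀ (init : List (Int × Int)),
        (lpositions t).foldl (stepB (t ++ [x])) init
          = (lpositions t).foldl (stepB t) init := by
      intro init
      refine PySem.List.foldl_congr_mem _ _ _ _ (fun acc i hi => ?_)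
      have hb := mem_lpositions hi
      unfold stepB
      rw [scanBack_prefix t [x] i.toNat hb.2]
    have halt : getMWTs_alt (t ++ [x])
        = (if x = "L" then stepB (t ++ [x]) (getMWTs_alt t) (t.length : Int)
           else getMWTs_alt t) := by
      unfold getMWTs_alt
      rw [lpositions_append, List.foldl_append]
      by_cases hL : x = "L"
      · subst hL; simp [haltcongr]
      · simp [hL, haltcongr]
    rw [henum, List.foldl_append, List.foldl_cons, List.foldl_nil, ih, halt]
    by_cases hB : x = "B"
    · subst hB
      simp [stepA, scanBack]
    · by_cases hL : x = "L"
      · subst hL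
        cases hreg : scanBack t t.length with
        | none =>
          simp [stepA, stepB, scanBack, hreg,
            scanBack_prefix t ["L"] t.length (Nat.le_refl _)]
        | some b =>
          simp [stepA, stepB, scanBack, hreg,
            scanBack_prefix t ["L"] t.length (Nat.le_refl _)]
      · simp [stepA, scanBack, hB, hL,
          scanBack_prefix t [x] t.length (Nat.le_refl _)]

-- ===== VERDICT (by name: the statement is the Claim_ definition above) =====
theorem getMWTs_spec : Claim_equal_getMWTs := by
  intro sentence _
  unfold Spec_getMWTs getMWTs
  rw [foldA_eq]
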